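-- pv_equiv track=rewrite | github.com/AJPfleger/advent-of-code | 2024/day19/day19.py | reduce_patterns
-- ===== SOURCE A (Python) =====
-- def reduce_patterns(patterns):
--     """
--     This is not relevant anymore but kept, since it was a cute function.
--     We only want to keep a minimal set of patterns. The reduced pattern set is
--     a orthonormal basis of all patterns.
--     """
--
--     p_set = set(patterns)
--     p_set.add("")  # empty string to start with
--     possible_lengths = set(len(p) for p in p_set)
--     possible_lengths = sorted(possible_lengths)
--
--     min_pat_set = set()
--
--     for p in p_set:
--         if len(p) == 1:
--             min_pat_set.add(p)
--
--     red_pat = set()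
--     for length in possible_lengths:
--         p_set_it = p_set.copy()
--         for p in p_set_it:
--             if len(p) == length:
--                 red_pat.add(p)
--                 p_set.remove(p)
--
--         all_set = all_combinations(red_pat)
--
--         for a in all_set:
--             p_set.discard(a)
--
--     red_pat.remove("")
--     return red_pat
--
-- def all_combinations(p_set):
--     all_set = p_set.copy()
--
--     for p in p_set:
--         for q in p_set:
--             all_set.add(p + q)
--             all_set.add(q + p)
--
--     return all_set
-- ===== SOURCE B (Python) =====
-- def reduce_patterns(patterns):
--     # Group distinct patterns by length; a pattern is kept iff no split point
--     # writes it as prefix+suffix with both halves already kept (shorter).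
--     groups = {}
--     for p in dict.fromkeys(patterns):
--         groups.setdefault(len(p), []).append(p)
--     kept = []
--     kept_set = set()
--     for length in sorted(groups):
--         if length == 0:
--             continue
--         for p in groups[length]:
--             if any(p[:i] in kept_set and p[i:] in kept_set for i in range(1, length)):
--                 continue
--             kept.append(p)
--             kept_set.add(p)
--     return set(kept)
-- ===== Notes on version B (the rewrite author's own statement) =====
-- stated objective: faster
-- what changed: Instead of generating all pairwise concatenations of the kept patterns at every length stage and discarding them from the remaining pool, B groups the distinct patterns by length once and, for each pattern in increasing length order, tests its length-1 split points for membership of both halves in the kept set.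
import Mathlib
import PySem

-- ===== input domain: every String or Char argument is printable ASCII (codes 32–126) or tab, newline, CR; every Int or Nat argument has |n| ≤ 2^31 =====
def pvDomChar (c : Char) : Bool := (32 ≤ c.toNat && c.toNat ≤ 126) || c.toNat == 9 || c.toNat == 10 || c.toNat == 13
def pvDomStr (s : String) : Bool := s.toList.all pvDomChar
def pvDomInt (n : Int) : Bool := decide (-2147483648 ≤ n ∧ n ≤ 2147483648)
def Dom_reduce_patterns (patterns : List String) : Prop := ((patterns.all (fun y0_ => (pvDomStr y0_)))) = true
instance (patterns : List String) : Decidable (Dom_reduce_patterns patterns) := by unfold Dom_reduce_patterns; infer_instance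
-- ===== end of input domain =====

-- B replaces A's per-stage generation of all pairwise concatenations with a split-point
-- membership test on patterns grouped by length (objective: faster; both return a Python set,
-- so only the set of returned patterns is significant).

-- ===== PORT A =====
-- helper all_combinations: all_set = p_set.copy(); for p: for q: add p+q; add q+p
def all_combinations (p_set : PySem.Set String) : PySem.Set String :=
  p_set.foldl (fun all_set p =>
    p_set.foldl (fun all_set q =>
      PySem.Set.add (PySem.Set.add all_set (p ++ q)) (q ++ p)) all_set) p_set

-- literal transliteration of A.  p_set.remove(p) in the inner move loop is ported as
-- Set.discard (p is always present: the loop iterates a copy of p_set, which is duplicate-free);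
-- red_pat.remove("") is ported as remove? (KeyError = none); "" is always present, so the
-- .getD fallback is never taken.
def reduce_patterns (patterns : List String) : List String :=
  let p_set0 := PySem.Set.add (PySem.Set.ofList patterns) ""
  let possible_lengths := PySem.List.sorted (PySem.Set.ofList (p_set0.map PySem.Str.len)) (fun x => x) false
  let _min_pat_set := p_set0.foldl (fun m p => if PySem.Str.len p == 1 then PySem.Set.add m p else m) (PySem.Set.empty)
  let st := possible_lengths.foldl (fun (st : List String × List String) length =>
      let p_set_it := st.1
      let st1 := p_set_it.foldl (fun (st : List String × List String) p =>
          if PySem.Str.len p == length then (PySem.Set.discard st.1 p, PySem.Set.add st.2 p) else st) st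
      let all_set := all_combinations st1.2
      (all_set.foldl (fun s a => PySem.Set.discard s a) st1.1, st1.2))
    (p_set0, PySem.Set.empty)
  ((PySem.Set.remove? st.2 "").getD st.2)

-- ===== PORT B =====
-- literal transliteration of Source B: group distinct patterns by length (dict.fromkeys dedup,
-- setdefault/append = Dict.modify), then keep p iff no split point has both halves kept.
def reduce_patterns_alt (patterns : List String) : List String :=
  let groups := (PySem.List.dedup patterns).foldl
      (fun (g : PySem.Dict Int (List String)) p => g.modify (PySem.Str.len p) [] (fun l => l ++ [p]))
      PySem.Dict.empty
  let st := (PySem.List.sorted groups.keys (fun x => x) false).foldl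
      (fun (st : List String × PySem.Set String) length =>
        if length == 0 then st else
        (groups.getD length []).foldl (fun (st : List String × PySem.Set String) p =>
            if (PySem.List.pyRange 1 length 1).any (fun i =>
                 PySem.Set.contains st.2 (PySem.Str.slice p none (some i)) &&
                 PySem.Set.contains st.2 (PySem.Str.slice p (some i) none))
            then st
            else (st.1 ++ [p], PySem.Set.add st.2 p)) st)
      ([], PySem.Set.empty)
  PySem.Set.ofList st.1

-- ===== PRECONDITION & SPEC =====
def Spec_reduce_patterns (patterns : List String) (out : List String) : Prop := out = reduce_patterns_alt patterns
instance (patterns : List String) (out : List String) : Decidable (Spec_reduce_patterns patterns out) := by unfold Spec_reduce_patterns; infer_instance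

-- ===== CLAIM (what is proved, stated in full; the proofs are below) =====
def Claim_equal_reduce_patterns : Prop := ∀ (patterns : List String), Dom_reduce_patterns patterns → Spec_reduce_patterns patterns (reduce_patterns patterns)

-- ===== LEMMAS AND PROOFS =====

-- proof-side copies of the two stage-loop bodies (definitionally equal to the ports' lambdas)
def stepA : (List String × List String) → Int → (List String × List String) :=
  fun (st : List String × List String) length =>
      let p_set_it := st.1
      let st1 := p_set_it.foldl (fun (st : List String × List String) p =>
          if PySem.Str.len p == length then (PySem.Set.discard st.1 p, PySem.Set.add st.2 p) else st) st
      let all_set := all_combinations st1.2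
      (all_set.foldl (fun s a => PySem.Set.discard s a) st1.1, st1.2)

def stepB (groups : PySem.Dict Int (List String)) :
    (List String × PySem.Set String) → Int → (List String × PySem.Set String) :=
  fun (st : List String × PySem.Set String) length =>
        (groups.getD length []).foldl (fun (st : List String × PySem.Set String) p =>
            if (PySem.List.pyRange 1 length 1).any (fun i =>
                 PySem.Set.contains st.2 (PySem.Str.slice p none (some i)) &&
                 PySem.Set.contains st.2 (PySem.Str.slice p (some i) none))
            then st
            else (st.1 ++ [p], PySem.Set.add st.2 p)) st

-- "p splits into two nonempty kept halves" (Bool, over a kept-list K)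
def splB (K : List String) (p : String) : Bool :=
  K.any fun a => K.any fun b => !(a == "") && !(b == "") && (p == a ++ b)

lemma splB_iff (K : List String) (p : String) :
    splB K p = true ↔ ∃ a ∈ K, ∃ b ∈ K, (a ≠ "" ∧ b ≠ "") ∧ p = a ++ b := by
  simp only [splB, List.any_eq_true, Bool.and_eq_true, Bool.not_eq_eq_eq_not, Bool.not_true,
    beq_iff_eq, beq_eq_false_iff_ne, ne_eq]

lemma splB_mono (K G : List String) (p : String) (h : splB K p = true) :
    splB (K ++ G) p = true := by
  rw [splB_iff] at h ⊢
  obtain ⟨a, ha, b, hb, h⟩ := h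
  exact ⟨a, List.mem_append_left _ ha, b, List.mem_append_left _ hb, h⟩

-- the canonical stage recursion both ports compute
def stages (D : List String) : List Int → List String → List String
  | [], kept => kept
  | L :: P, kept =>
      stages D P (kept ++ D.filter (fun p => (PySem.Str.len p == L) && !splB kept p))

lemma set_add_of_not_mem (l : List String) (a : String) (h : a ∉ l) :
    PySem.Set.add l a = l ++ [a] := by
  simp [PySem.Set.add, PySem.Set.contains, List.contains_eq_mem, h]

lemma stages_ne_empty (D : List String) : ∀ (P : List Int) (kept : List String),
    (∀ q ∈ kept, q ≠ "") → (∀ L ∈ P, 0 < L) →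
    ∀ q ∈ stages D P kept, q ≠ "" := by
  intro P
  induction P with
  | nil => intro kept hk _ q hq; exact hk q hq
  | cons L P ih =>
    intro kept hk hpos q hq
    refine ih _ ?_ (fun L' hL' => hpos L' (List.mem_cons_of_mem _ hL')) q hq
    intro r hr
    rcases List.mem_append.mp hr with h | h
    · exact hk r h
    · have := List.of_mem_filter h
      have hlen : PySem.Str.len r = L := by
        simpa using (Bool.and_eq_true ..).mp this |>.1
      have hL : 0 < L := hpos L (List.mem_cons_self ..)
      intro he
      rw [he] at hlen
      simp [PySem.Str.len] at hlen
      omega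

lemma stages_nodup (D : List String) (hD : D.Nodup) : ∀ (P : List Int) (kept : List String),
    kept.Nodup → P.Pairwise (· < ·) →
    (∀ q ∈ kept, ∀ L ∈ P, PySem.Str.len q < L) →
    (stages D P kept).Nodup := by
  intro P
  induction P with
  | nil => intro kept hk _ _; exact hk
  | cons L P ih =>
    intro kept hk hp hlen
    refine ih _ ?_ hp.of_cons ?_
    · rw [List.nodup_append]
      refine ⟨hk, (hD.filter _), ?_⟩
      intro x hx y hy hxy
      subst hxy
      have := List.of_mem_filter hy
      have hLx : PySem.Str.len x = L := by simpa using (Bool.and_eq_true ..).mp this |>.1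
      have := hlen x hx L (List.mem_cons_self ..)
      omega
    · intro q hq L' hL'
      have hLL' : L < L' := (List.pairwise_cons.mp hp).1 L' hL'
      rcases List.mem_append.mp hq with h | h
      · exact hlen q h L' (List.mem_cons_of_mem _ hL')
      · have := List.of_mem_filter h
        have : PySem.Str.len q = L := by simpa using (Bool.and_eq_true ..).mp this |>.1
        omega

lemma foldl_discard : ∀ (l : List String) (s : List String),
    l.foldl (fun s a => PySem.Set.discard s a) s = s.filter (fun x => !l.contains x) := by
  intro l
  induction l with
  | nil => intro s; simp
  | cons a t ih =>
    intro s
    rw [List.foldl_cons, ih]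
    simp only [PySem.Set.discard, List.filter_filter]
    refine List.filter_congr ?_
    intro x _
    by_cases hxa : x = a <;> simp [hxa]

lemma foldl_skip_zero {σ : Type} (f : σ → Int → σ) : ∀ (l : List Int) (s : σ),
    l.foldl (fun st x => if x == 0 then st else f st x) s
    = (l.filter (fun x => !(x == 0))).foldl f s := by
  intro l
  induction l with
  | nil => intro s; rfl
  | cons a t ih =>
    intro s
    rw [List.foldl_cons, List.filter_cons]
    by_cases ha : a = 0
    · have hb : (a == 0) = true := by simp [ha]
      rw [if_pos hb]
      simpa [hb] using ih s
    · have hb : (a == 0) = false := by simp [ha]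
      rw [if_neg (by simp [hb])]
      simpa [hb] using ih (f s a)

lemma sorted_lt_ext : ∀ (l₁ : List Int), ∀ (l₂ : List Int), l₁.Pairwise (· < ·) → l₂.Pairwise (· < ·) →
    (∀ x, x ∈ l₁ ↔ x ∈ l₂) → l₁ = l₂ := by
  intro l₁
  induction l₁ with
  | nil =>
    intro l₂ _ _ hm
    cases l₂ with
    | nil => rfl
    | cons b t => exact absurd ((hm b).mpr (List.mem_cons_self ..)) (List.not_mem_nil)
  | cons a t ih =>
    intro l₂ h1 h2 hm
    cases l₂ with
    | nil => exact absurd ((hm a).mp (List.mem_cons_self ..)) (List.not_mem_nil)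
    | cons b u =>
      have hab : a = b := by
        have ha2 : a ∈ b :: u := (hm a).mp (List.mem_cons_self ..)
        have hb1 : b ∈ a :: t := (hm b).mpr (List.mem_cons_self ..)
        rcases List.mem_cons.mp ha2 with h | h
        · exact h
        · rcases List.mem_cons.mp hb1 with h' | h'
          · exact h'.symm
          · have := (List.pairwise_cons.mp h1).1 b h'
            have := (List.pairwise_cons.mp h2).1 a h
            omega
      subst hab
      have : t = u := by
        refine ih u h1.of_cons h2.of_cons ?_
        intro x
        constructor
        · intro hx
          have : x ∈ a :: u := (hm x).mp (List.mem_cons_of_mem _ hx)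
          rcases List.mem_cons.mp this with h | h
          · exact absurd hx (by subst h; exact fun hc => absurd ((List.pairwise_cons.mp h1).1 x hc) (by omega))
          · exact h
        · intro hx
          have : x ∈ a :: t := (hm x).mpr (List.mem_cons_of_mem _ hx)
          rcases List.mem_cons.mp this with h | h
          · exact absurd hx (by subst h; exact fun hc => absurd ((List.pairwise_cons.mp h2).1 x hc) (by omega))
          · exact h
      rw [this]

lemma mem_inner_fold (p : String) : ∀ (l acc : List String) (x : String),
    x ∈ l.foldl (fun all_set q =>
      PySem.Set.add (PySem.Set.add all_set (p ++ q)) (q ++ p)) acc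
    ↔ x ∈ acc ∨ ∃ q ∈ l, x = p ++ q ∨ x = q ++ p := by
  intro l
  induction l with
  | nil => simp
  | cons q t ih =>
    intro acc x
    rw [List.foldl_cons, ih]
    simp only [PySem.Set.mem_add, List.mem_cons]
    constructor
    · rintro (((h | h) | h) | ⟨r, hr, h⟩)
      · exact Or.inl h
      · exact Or.inr ⟨q, Or.inl rfl, Or.inl h⟩
      · exact Or.inr ⟨q, Or.inl rfl, Or.inr h⟩
      · exact Or.inr ⟨r, Or.inr hr, h⟩
    · rintro (h | ⟨r, (rfl | hr), h⟩)
      · exact Or.inl (Or.inl (Or.inl h))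
      · rcases h with h | h
        · exact Or.inl (Or.inl (Or.inr h))
        · exact Or.inl (Or.inr h)
      · exact Or.inr ⟨r, hr, h⟩

lemma mem_outer_fold (s : List String) : ∀ (l acc : List String) (x : String),
    x ∈ l.foldl (fun all_set p =>
      s.foldl (fun all_set q =>
        PySem.Set.add (PySem.Set.add all_set (p ++ q)) (q ++ p)) all_set) acc
    ↔ x ∈ acc ∨ ∃ p ∈ l, ∃ q ∈ s, x = p ++ q ∨ x = q ++ p := by
  intro l
  induction l with
  | nil => simp
  | cons p t ih =>
    intro acc x
    rw [List.foldl_cons, ih, mem_inner_fold]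
    constructor
    · rintro ((h | ⟨q, hq, h⟩) | ⟨r, hr, q, hq, h⟩)
      · exact Or.inl h
      · exact Or.inr ⟨p, List.mem_cons_self .., q, hq, h⟩
      · exact Or.inr ⟨r, List.mem_cons_of_mem _ hr, q, hq, h⟩
    · rintro (h | ⟨r, hr, q, hq, h⟩)
      · exact Or.inl (Or.inl h)
      · rcases List.mem_cons.mp hr with rfl | hr
        · exact Or.inl (Or.inr ⟨q, hq, h⟩)
        · exact Or.inr ⟨r, hr, q, hq, h⟩

lemma mem_allcomb (s : List String) (x : String) :
    x ∈ all_combinations s ↔ x ∈ s ∨ ∃ a ∈ s, ∃ b ∈ s, x = a ++ b := by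
  unfold all_combinations
  rw [mem_outer_fold]
  constructor
  · rintro (h | ⟨a, ha, b, hb, h | h⟩)
    · exact Or.inl h
    · exact Or.inr ⟨a, ha, b, hb, h⟩
    · exact Or.inr ⟨b, hb, a, ha, h⟩
  · rintro (h | ⟨a, ha, b, hb, h⟩)
    · exact Or.inl h
    · exact Or.inr ⟨a, ha, b, hb, Or.inl h⟩

lemma mem_allcomb_cons_iff (kept : List String) (x : String)
    (hx : x ≠ "")
    (hlen : ∀ q ∈ kept, q.toList.length < x.toList.length) :
    x ∈ all_combinations ("" :: kept) ↔ splB kept x = true := by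
  rw [mem_allcomb, splB_iff]
  have hself : x ∉ ("" :: kept) := by
    intro h
    rcases List.mem_cons.mp h with h | h
    · exact hx h
    · exact absurd (hlen x h) (by omega)
  constructor
  · rintro (h | ⟨a, ha, b, hb, h⟩)
    · exact absurd h hself
    · by_cases hae : a = ""
      · subst hae
        rw [show ("" ++ b : String) = b from by simp] at h
        subst h
        exact absurd hb hself
      · by_cases hbe : b = ""
        · subst hbe
          rw [show (a ++ "" : String) = a from by simp] at h
          subst h
          exact absurd ha hself
        · have ha' : a ∈ kept := by
            rcases List.mem_cons.mp ha with h' | h'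
            · exact absurd h' hae
            · exact h'
          have hb' : b ∈ kept := by
            rcases List.mem_cons.mp hb with h' | h'
            · exact absurd h' hbe
            · exact h'
          exact ⟨a, ha', b, hb', ⟨hae, hbe⟩, h⟩
  · rintro ⟨a, ha, b, hb, ⟨ha1, hb1⟩, h⟩
    exact Or.inr ⟨a, List.mem_cons_of_mem _ ha, b, List.mem_cons_of_mem _ hb, h⟩

lemma inner_move (L : Int) : ∀ (l : List String), ∀ (s red : List String), l.Nodup →
    (∀ p ∈ l, PySem.Str.len p = L → p ∉ red) →
    l.foldl (fun (st : List String × List String) p =>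
        if PySem.Str.len p == L then (PySem.Set.discard st.1 p, PySem.Set.add st.2 p) else st) (s, red)
    = (s.filter (fun x => !(PySem.Str.len x == L && l.contains x)),
       red ++ l.filter (fun p => PySem.Str.len p == L)) := by
  intro l
  induction l with
  | nil => intro s red _ _; simp
  | cons p t ih =>
    intro s red hnd hfresh
    rw [List.foldl_cons, List.filter_cons]
    by_cases hp : PySem.Str.len p = L
    · have hb : (PySem.Str.len p == L) = true := beq_iff_eq.mpr hp
      rw [if_pos hb, hb]
      have hpr : p ∉ red := hfresh p (List.mem_cons_self ..) hp
      rw [set_add_of_not_mem red p hpr]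
      rw [ih (PySem.Set.discard s p) (red ++ [p]) hnd.of_cons ?fresh]
      case fresh =>
        intro q hq hqL
        rw [List.mem_append]
        rintro (h | h)
        · exact hfresh q (List.mem_cons_of_mem _ hq) hqL h
        · rcases List.mem_singleton.mp h with rfl
          exact (List.nodup_cons.mp hnd).1 hq
      rw [Prod.mk.injEq]
      constructor
      · simp only [PySem.Set.discard, List.filter_filter]
        refine List.filter_congr ?_
        intro x _
        by_cases hxp : x = p
        · subst hxp
          simp only [List.contains_cons, BEq.rfl, Bool.true_or, hb, Bool.and_self]
          simp
        · simp [hxp]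
      · simp
    · have hb : (PySem.Str.len p == L) = false := beq_eq_false_iff_ne.mpr hp
      rw [if_neg (ne_true_of_eq_false hb), hb]
      rw [ih s red hnd.of_cons (fun q hq hqL => hfresh q (List.mem_cons_of_mem _ hq) hqL)]
      rw [Prod.mk.injEq]
      constructor
      · refine List.filter_congr ?_
        intro x _
        by_cases hxp : x = p
        · subst hxp
          simp only [hb, Bool.false_and, Bool.not_false]
        · simp [hxp]
      · simp

lemma B_check_eq (K0 acc : List String) (p : String) (L : Int)
    (hL : L = PySem.Str.len p)
    (ha : ∀ q ∈ acc, q.toList.length = p.toList.length) :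
    ((PySem.List.pyRange 1 L 1).any (fun i =>
        PySem.Set.contains (K0 ++ acc) (PySem.Str.slice p none (some i)) &&
        PySem.Set.contains (K0 ++ acc) (PySem.Str.slice p (some i) none)))
    = splB K0 p := by
  rw [Bool.eq_iff_iff]
  rw [List.any_eq_true, splB_iff]
  constructor
  · rintro ⟨i, hi, hc⟩
    obtain ⟨hi1, hi2⟩ := PySem.List.mem_pyRange_one.mp hi
    have h0i : (0:Int) ≤ i := by omega
    have hnlt : i.toNat < p.toList.length := by
      rw [hL] at hi2; simp only [PySem.Str.len] at hi2; omega
    have hn1 : 1 ≤ i.toNat := by omega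
    have hsl1 : (PySem.Str.slice p none (some i)).toList = p.toList.take i.toNat := by
      simp [PySem.Str.slice, PySem.Chars.slice_eq_listSlice, PySem.List.slice_to _ h0i]
    have hsl2 : (PySem.Str.slice p (some i) none).toList = p.toList.drop i.toNat := by
      simp [PySem.Str.slice, PySem.Chars.slice_eq_listSlice, PySem.List.slice_from _ h0i]
    rw [Bool.and_eq_true] at hc
    obtain ⟨hc1, hc2⟩ := hc
    have hm1 : PySem.Str.slice p none (some i) ∈ K0 ++ acc := by
      simpa [PySem.Set.contains, List.contains_eq_mem] using hc1
    have hm2 : PySem.Str.slice p (some i) none ∈ K0 ++ acc := by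
      simpa [PySem.Set.contains, List.contains_eq_mem] using hc2
    have hlen1 : (PySem.Str.slice p none (some i)).toList.length < p.toList.length := by
      rw [hsl1, List.length_take]; omega
    have hlen2 : (PySem.Str.slice p (some i) none).toList.length < p.toList.length := by
      rw [hsl2, List.length_drop]; omega
    have hk1 : PySem.Str.slice p none (some i) ∈ K0 := by
      rcases List.mem_append.mp hm1 with h | h
      · exact h
      · exact absurd (ha _ h) (by omega)
    have hk2 : PySem.Str.slice p (some i) none ∈ K0 := by
      rcases List.mem_append.mp hm2 with h | h
      · exact h
      · exact absurd (ha _ h) (by omega)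
    refine ⟨_, hk1, _, hk2, ⟨?_, ?_⟩, ?_⟩
    · intro h
      have h1 := hsl1; rw [h] at h1
      have h2 : (p.toList.take i.toNat).length = 0 := by rw [← h1]; simp
      rw [List.length_take] at h2; omega
    · intro h
      have h1 := hsl2; rw [h] at h1
      have h2 : (p.toList.drop i.toNat).length = 0 := by rw [← h1]; simp
      rw [List.length_drop] at h2; omega
    · apply String.toList_inj.mp
      rw [String.toList_append, hsl1, hsl2, List.take_append_drop]
  · rintro ⟨a, hak, b, hbk, ⟨ha1, hb1⟩, hab⟩
    have hpl : p.toList = a.toList ++ b.toList := by rw [hab, String.toList_append]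
    have hal : 1 ≤ a.toList.length := by
      rcases Nat.eq_zero_or_pos a.toList.length with h | h
      · exact absurd (String.toList_eq_nil_iff.mp (List.length_eq_zero_iff.mp h)) ha1
      · exact h
    have hbl : 1 ≤ b.toList.length := by
      rcases Nat.eq_zero_or_pos b.toList.length with h | h
      · exact absurd (String.toList_eq_nil_iff.mp (List.length_eq_zero_iff.mp h)) hb1
      · exact h
    refine ⟨(a.toList.length : Int), ?_, ?_⟩
    · rw [PySem.List.mem_pyRange_one]
      constructor
      · exact_mod_cast hal
      · rw [hL]; simp only [PySem.Str.len]
        have : p.toList.length = a.toList.length + b.toList.length := by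
          rw [hpl, List.length_append]
        omega
    · have hsl1 : PySem.Str.slice p none (some (a.toList.length : Int)) = a := by
        apply String.toList_inj.mp
        simp [PySem.Str.slice, PySem.Chars.slice_eq_listSlice]
        rw [hpl]
        simp
      have hsl2 : PySem.Str.slice p (some (a.toList.length : Int)) none = b := by
        apply String.toList_inj.mp
        simp [PySem.Str.slice, PySem.Chars.slice_eq_listSlice]
        rw [hpl]
        simp
      rw [hsl1, hsl2]
      simp [PySem.Set.contains, List.contains_eq_mem, List.mem_append, hak, hbk]

lemma B_group_fold (L : Int) (K0 : List String) (h0 : ∀ q ∈ K0, PySem.Str.len q < L) :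
    ∀ (G : List String), ∀ (acc : List String), G.Nodup → (∀ p ∈ G, PySem.Str.len p = L) →
    (∀ q ∈ acc, PySem.Str.len q = L) → (∀ p ∈ G, p ∉ acc) →
    G.foldl (fun (st : List String × PySem.Set String) p =>
        if (PySem.List.pyRange 1 L 1).any (fun i =>
             PySem.Set.contains st.2 (PySem.Str.slice p none (some i)) &&
             PySem.Set.contains st.2 (PySem.Str.slice p (some i) none))
        then st
        else (st.1 ++ [p], PySem.Set.add st.2 p)) (K0 ++ acc, K0 ++ acc)
    = (K0 ++ (acc ++ G.filter (fun p => !splB K0 p)),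
       K0 ++ (acc ++ G.filter (fun p => !splB K0 p))) := by
  intro G
  induction G with
  | nil => intro acc _ _ _ _; simp
  | cons p t ih =>
    intro acc hnd hG hacc hdisj
    rw [List.foldl_cons, List.filter_cons]
    have hpL : PySem.Str.len p = L := hG p (List.mem_cons_self ..)
    have hlen_eq : ∀ q ∈ acc, q.toList.length = p.toList.length := by
      intro q hq
      have h1 := hacc q hq
      rw [← hpL] at h1
      simp only [PySem.Str.len] at h1
      exact_mod_cast h1
    have hchk := B_check_eq K0 acc p L hpL.symm hlen_eq
    by_cases hs : splB K0 p = true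
    · rw [if_pos (by rw [hchk]; exact hs), hs]
      simp only [Bool.not_true]
      rw [ih acc hnd.of_cons (fun q hq => hG q (List.mem_cons_of_mem _ hq)) hacc
          (fun q hq => hdisj q (List.mem_cons_of_mem _ hq))]
      simp
    · have hs' : splB K0 p = false := by simpa using hs
      rw [if_neg (by rw [hchk, hs']; simp), hs']
      simp only [Bool.not_false]
      have hfresh : p ∉ K0 ++ acc := by
        rw [List.mem_append]
        rintro (h | h)
        · have := h0 p h; omega
        · exact hdisj p (List.mem_cons_self ..) h
      have hadd : PySem.Set.add (K0 ++ acc) p = K0 ++ (acc ++ [p]) := by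
        rw [set_add_of_not_mem _ _ hfresh, List.append_assoc]
      simp only [hadd]
      have harr : K0 ++ acc ++ [p] = K0 ++ (acc ++ [p]) := by rw [List.append_assoc]
      rw [harr]
      rw [ih (acc ++ [p]) hnd.of_cons (fun q hq => hG q (List.mem_cons_of_mem _ hq)) ?hacc' ?hdisj']
      · simp
      case hacc' =>
        intro q hq
        rcases List.mem_append.mp hq with h | h
        · exact hacc q h
        · rcases List.mem_singleton.mp h with rfl; exact hpL
      case hdisj' =>
        intro q hq
        rw [List.mem_append]
        rintro (h | h)
        · exact hdisj q (List.mem_cons_of_mem _ hq) h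
        · rcases List.mem_singleton.mp h with rfl
          exact (List.nodup_cons.mp hnd).1 hq


lemma A_stage_fold (D : List String) (hD : D.Nodup) : ∀ (P : List Int), ∀ (kept pset : List String),
    P.Pairwise (· < ·) → (∀ L ∈ P, 0 < L) →
    (∀ q ∈ kept, ∀ L ∈ P, PySem.Str.len q < L) →
    pset = D.filter (fun p => decide (PySem.Str.len p ∈ P) && !splB kept p) →
    (P.foldl stepA (pset, "" :: kept)).2 = "" :: stages D P kept := by
  intro P
  induction P with
  | nil => intro kept pset _ _ _ _; simp [stages]
  | cons L P' ih =>
    intro kept pset hpw hpos hk hps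
    have hLpos : 0 < L := hpos L (List.mem_cons_self ..)
    have hLP' : ∀ M ∈ P', L < M := (List.pairwise_cons.mp hpw).1
    have hpsetnd : pset.Nodup := hps ▸ hD.filter _
    have hfresh : ∀ p ∈ pset, PySem.Str.len p = L → p ∉ ("" :: kept) := by
      intro p _ hpl h
      rcases List.mem_cons.mp h with rfl | h
      · simp only [PySem.Str.len] at hpl
        simp at hpl
        omega
      · have := hk p h L (List.mem_cons_self ..)
        omega
    have hG : pset.filter (fun p => PySem.Str.len p == L) = D.filter (fun p => (PySem.Str.len p == L) && !splB kept p) := by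
      rw [hps, List.filter_filter]
      refine List.filter_congr ?_
      intro x _
      by_cases hxl : PySem.Str.len x = L
      · have hb : (PySem.Str.len x == L) = true := beq_iff_eq.mpr hxl
        have hmem : decide (PySem.Str.len x ∈ L :: P') = true := by
          rw [decide_eq_true_iff]; rw [hxl]; exact List.mem_cons_self ..
        rw [hb, hmem]
        simp
      · have hb : (PySem.Str.len x == L) = false := beq_eq_false_iff_ne.mpr hxl
        rw [hb]
        simp
    have hstep : stepA (pset, "" :: kept) L
        = (D.filter (fun p => decide (PySem.Str.len p ∈ P') &&
             !splB (kept ++ D.filter (fun q => (PySem.Str.len q == L) && !splB kept q)) p),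
           "" :: (kept ++ D.filter (fun q => (PySem.Str.len q == L) && !splB kept q))) := by
      simp only [stepA]
      rw [inner_move L pset pset ("" :: kept) hpsetnd hfresh]
      rw [hG, List.cons_append, foldl_discard]
      rw [Prod.mk.injEq]
      refine ⟨?_, by simp⟩
      have h1 : pset.filter (fun x => !(PySem.Str.len x == L && pset.contains x))
          = pset.filter (fun x => !(PySem.Str.len x == L)) := by
        refine List.filter_congr ?_
        intro x hx
        rw [List.contains_eq_mem, decide_eq_true_iff.mpr hx]
        simp
      rw [h1, hps, List.filter_filter, List.filter_filter]
      refine List.filter_congr ?_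
      intro x hxD
      set kept' := kept ++ D.filter (fun q => (PySem.Str.len q == L) && !splB kept q) with hkept'
      by_cases hxl : PySem.Str.len x = L
      · have hb : (PySem.Str.len x == L) = true := beq_iff_eq.mpr hxl
        have hnot : decide (PySem.Str.len x ∈ P') = false := by
          rw [decide_eq_false_iff_not]
          intro h
          have := hLP' _ h
          omega
        rw [hb, hnot]
        simp
      · have hb : (PySem.Str.len x == L) = false := beq_eq_false_iff_ne.mpr hxl
        by_cases hxP : PySem.Str.len x ∈ P'
        · have hmemc : decide (PySem.Str.len x ∈ L :: P') = true := by
            rw [decide_eq_true_iff]; exact List.mem_cons_of_mem _ hxP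
          have hmem' : decide (PySem.Str.len x ∈ P') = true := decide_eq_true_iff.mpr hxP
          have hLx : L < PySem.Str.len x := hLP' _ hxP
          have hxne : x ≠ "" := by
            intro h
            rw [h] at hLx
            simp only [PySem.Str.len] at hLx
            simp at hLx
            omega
          have hbound : ∀ q ∈ kept', q.toList.length < x.toList.length := by
            intro q hq
            have hxlen : (q.toList.length : Int) < (x.toList.length : Int) → q.toList.length < x.toList.length := by
              intro h; exact_mod_cast h
            apply hxlen
            rcases List.mem_append.mp hq with h | h
            · have h1 := hk q h L (List.mem_cons_self ..)
              simp only [PySem.Str.len] at h1 hLx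
              omega
            · have h1 := List.of_mem_filter h
              have h2 : PySem.Str.len q = L := by
                simpa using (Bool.and_eq_true ..).mp h1 |>.1
              simp only [PySem.Str.len] at h2 hLx
              omega
          have hcont : List.contains (all_combinations ("" :: kept')) x = splB kept' x := by
            rw [List.contains_eq_mem]
            rcases hsp : splB kept' x with _ | _
            · rw [decide_eq_false_iff_not]
              intro h
              rw [(mem_allcomb_cons_iff kept' x hxne hbound)] at h
              rw [h] at hsp; cases hsp
            · rw [decide_eq_true_iff]
              exact (mem_allcomb_cons_iff kept' x hxne hbound).mpr hsp
          rw [hb, hmemc, hmem', hcont]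
          rcases hsp' : splB kept' x with _ | _
          · have : splB kept x = false := by
              rcases h : splB kept x with _ | _
              · rfl
              · have := splB_mono kept (D.filter (fun q => (PySem.Str.len q == L) && !splB kept q)) x h
                rw [← hkept'] at this
                rw [this] at hsp'; cases hsp'
            rw [this]
            simp
          · simp
        · have hnotc : decide (PySem.Str.len x ∈ L :: P') = false := by
            rw [decide_eq_false_iff_not]
            intro h
            rcases List.mem_cons.mp h with h | h
            · exact hxl h
            · exact hxP h
          have hnot' : decide (PySem.Str.len x ∈ P') = false := decide_eq_false_iff_not.mpr hxP
          rw [hnotc, hnot']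
          simp
    rw [List.foldl_cons, hstep]
    rw [ih (kept ++ D.filter (fun q => (PySem.Str.len q == L) && !splB kept q)) _
        hpw.of_cons (fun M hM => hpos M (List.mem_cons_of_mem _ hM)) ?hk' rfl]
    case hk' =>
      intro q hq M hM
      have hLM : L < M := hLP' M hM
      rcases List.mem_append.mp hq with h | h
      · exact hk q h M (List.mem_cons_of_mem _ hM)
      · have h1 := List.of_mem_filter h
        have h2 : PySem.Str.len q = L := by
          simpa using (Bool.and_eq_true ..).mp h1 |>.1
        omega
    rfl

lemma B_stage_fold (D : List String) (hD : D.Nodup)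
    (groups : PySem.Dict Int (List String))
    (hg : ∀ L, groups.getD L [] = D.filter (fun p => PySem.Str.len p == L)) :
    ∀ (P : List Int), ∀ (kept : List String),
    P.Pairwise (· < ·) → (∀ L ∈ P, 0 < L) →
    (∀ q ∈ kept, ∀ L ∈ P, PySem.Str.len q < L) → kept.Nodup →
    (P.foldl (stepB groups) (kept, kept)) = (stages D P kept, stages D P kept) := by
  intro P
  induction P with
  | nil => intro kept _ _ _ _; simp [stages]
  | cons L P' ih =>
    intro kept hpw hpos hk hnd
    have hLpos : 0 < L := hpos L (List.mem_cons_self ..)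
    have hLP' : ∀ M ∈ P', L < M := (List.pairwise_cons.mp hpw).1
    have h0' : ∀ q ∈ kept, PySem.Str.len q < L := fun q hq => hk q hq L (List.mem_cons_self ..)
    have hstep : stepB groups (kept, kept) L
        = (kept ++ D.filter (fun p => (PySem.Str.len p == L) && !splB kept p),
           kept ++ D.filter (fun p => (PySem.Str.len p == L) && !splB kept p)) := by
      simp only [stepB, hg L]
      have := B_group_fold L kept h0' (D.filter (fun p => PySem.Str.len p == L)) []
        (hD.filter _)
        (fun p hp => by simpa using (List.of_mem_filter hp))
        (by simp) (by simp)
      rw [List.append_nil] at this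
      rw [this, List.nil_append, List.filter_filter]
      have hcomm : List.filter (fun a => !splB kept a && (PySem.Str.len a == L)) D
          = List.filter (fun p => (PySem.Str.len p == L) && !splB kept p) D :=
        List.filter_congr (fun x _ => Bool.and_comm _ _)
      rw [hcomm]
    rw [List.foldl_cons, hstep]
    have hnd' : (kept ++ D.filter (fun p => (PySem.Str.len p == L) && !splB kept p)).Nodup := by
      rw [List.nodup_append]
      refine ⟨hnd, hD.filter _, ?_⟩
      intro x hx y hy hxy
      subst hxy
      have h1 := List.of_mem_filter hy
      have h2 : PySem.Str.len x = L := by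
        simpa using (Bool.and_eq_true ..).mp h1 |>.1
      have := h0' x hx
      omega
    rw [ih _ hpw.of_cons (fun M hM => hpos M (List.mem_cons_of_mem _ hM)) ?hk' hnd']
    case hk' =>
      intro q hq M hM
      have hLM : L < M := hLP' M hM
      rcases List.mem_append.mp hq with h | h
      · exact hk q h M (List.mem_cons_of_mem _ hM)
      · have h1 := List.of_mem_filter h
        have h2 : PySem.Str.len q = L := by
          simpa using (Bool.and_eq_true ..).mp h1 |>.1
        omega
    rfl

-- ===== VERDICT (by name: the statement is the Claim_ definition above) =====
-- assembly helper: A's length-0 stage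
lemma stage0_eval (patterns : List String) (P : List Int)
    (hposP : ∀ L ∈ P, 0 < L)
    (hPmem : ∀ x, x ∈ P ↔ (x ∈ (PySem.Set.add (PySem.Set.ofList patterns) "").map PySem.Str.len ∧ x ≠ 0)) :
    stepA (PySem.Set.add (PySem.Set.ofList patterns) "", ([] : List String)) 0
    = ((PySem.Set.ofList patterns).filter
         (fun p => decide (PySem.Str.len p ∈ P) && !splB [] p), [""]) := by
  have hD : (PySem.Set.ofList patterns).Nodup := PySem.Set.nodup_ofList patterns
  set D := PySem.Set.ofList patterns with hDdef
  set S' := PySem.Set.add D "" with hS'def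
  have hS'nd : S'.Nodup := PySem.Set.nodup_add D "" hD
  have hS'mem : ("" : String) ∈ S' := (PySem.Set.mem_add D "" "").mpr (Or.inr rfl)
  have hlen0 : ∀ x : String, (PySem.Str.len x = 0) ↔ x = "" := by
    intro x
    simp only [PySem.Str.len]
    constructor
    · intro h
      have : x.toList.length = 0 := by exact_mod_cast h
      exact String.toList_eq_nil_iff.mp (List.length_eq_zero_iff.mp this)
    · intro h; rw [h]; simp
  have hfilter0 : S'.filter (fun p => PySem.Str.len p == 0) = [""] := by
    have h1 : S'.filter (fun p => PySem.Str.len p == 0) = S'.filter (fun p => p == "") := by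
      refine List.filter_congr ?_
      intro x _
      rcases h : (x == "") with _ | _
      · have : x ≠ "" := by simpa using h
        exact beq_eq_false_iff_ne.mpr (fun hc => this ((hlen0 x).mp hc))
      · have : x = "" := by simpa using h
        exact beq_iff_eq.mpr ((hlen0 x).mpr this)
    rw [h1, List.filter_beq, List.count_eq_one_of_mem hS'nd hS'mem]
    rfl
  simp only [stepA]
  rw [inner_move 0 S' S' [] hS'nd (fun p _ _ h => absurd h (List.not_mem_nil))]
  rw [hfilter0, foldl_discard]
  simp only [List.nil_append]
  rw [Prod.mk.injEq]
  refine ⟨?_, rfl⟩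
  have h1 : S'.filter (fun x => !(PySem.Str.len x == 0 && List.contains S' x))
      = S'.filter (fun x => !(PySem.Str.len x == 0)) := by
    refine List.filter_congr ?_
    intro x hx
    rw [List.contains_eq_mem, decide_eq_true_iff.mpr hx]
    simp
  rw [h1]
  have h2 : S'.filter (fun x => !(PySem.Str.len x == 0)) = D.filter (fun x => !(PySem.Str.len x == 0)) := by
    rw [hS'def]
    simp only [PySem.Set.add]
    rcases h : PySem.Set.contains D "" with _ | _
    · rw [if_neg (by simp), List.filter_append]
      have : List.filter (fun x => !(PySem.Str.len x == 0)) [""] = [] := by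
        simp
      rw [this, List.append_nil]
    · rw [if_pos rfl]
  rw [h2, List.filter_filter]
  refine List.filter_congr ?_
  intro x hxD
  by_cases hx0 : PySem.Str.len x = 0
  · have hb : (PySem.Str.len x == 0) = true := beq_iff_eq.mpr hx0
    have hP : decide (PySem.Str.len x ∈ P) = false := by
      rw [decide_eq_false_iff_not]
      intro h
      have := hposP _ h
      omega
    rw [hb, hP]
    simp
  · have hb : (PySem.Str.len x == 0) = false := beq_eq_false_iff_ne.mpr hx0
    have hcont : List.contains (all_combinations [""]) x = false := by
      rw [List.contains_eq_mem, decide_eq_false_iff_not]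
      intro h
      rcases (mem_allcomb [""] x).mp h with h | ⟨a, ha, b, hb', h⟩
      · exact hx0 ((hlen0 x).mpr (List.mem_singleton.mp h))
      · rcases List.mem_singleton.mp ha with rfl
        rcases List.mem_singleton.mp hb' with rfl
        rw [show ("" ++ "" : String) = "" from rfl] at h
        exact hx0 ((hlen0 x).mpr h)
    have hP : decide (PySem.Str.len x ∈ P) = true := by
      rw [decide_eq_true_iff, hPmem]
      refine ⟨List.mem_map.mpr ⟨x, ?_, rfl⟩, hx0⟩
      exact (PySem.Set.mem_add D "" x).mpr (Or.inl hxD)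
    rw [hb, hP, hcont]
    simp [splB]

theorem reduce_patterns_spec : Claim_equal_reduce_patterns := by
  intro patterns _
  show reduce_patterns patterns = reduce_patterns_alt patterns
  have hD : (PySem.Set.ofList patterns).Nodup := PySem.Set.nodup_ofList patterns
  set D := PySem.Set.ofList patterns with hDdef
  set S' := PySem.Set.add D "" with hS'def
  set LA := PySem.List.sorted (PySem.Set.ofList (S'.map PySem.Str.len)) (fun x => x) false with hLAdef
  -- LA is strictly increasing, contains 0, and all members are ≥ 0
  have hpwLA : LA.Pairwise (· < ·) := PySem.List.sorted_ofList_pairwise_lt _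
  have hmemLA : ∀ x, x ∈ LA ↔ x ∈ S'.map PySem.Str.len := by
    intro x
    rw [hLAdef, PySem.List.mem_sorted, PySem.Set.mem_ofList]
  have hnonneg : ∀ x ∈ LA, 0 ≤ x := by
    intro x hx
    rcases List.mem_map.mp ((hmemLA x).mp hx) with ⟨p, _, rfl⟩
    simp [PySem.Str.len]
  have h0LA : (0 : Int) ∈ LA := by
    rw [hmemLA]
    refine List.mem_map.mpr ⟨"", (PySem.Set.mem_add D "" "").mpr (Or.inr rfl), ?_⟩
    simp [PySem.Str.len]
  obtain ⟨P, hLAeq⟩ : ∃ P, LA = 0 :: P := by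
    cases hL : LA with
    | nil => rw [hL] at h0LA; exact absurd h0LA (List.not_mem_nil)
    | cons a P =>
      refine ⟨P, ?_⟩
      have ha : a = 0 := by
        rw [hL] at h0LA
        rcases List.mem_cons.mp h0LA with h | h
        · exact h.symm
        · have h1 : a < 0 := by
            rw [hL] at hpwLA
            exact (List.pairwise_cons.mp hpwLA).1 0 h
          have h2 : 0 ≤ a := hnonneg a (by rw [hL]; exact List.mem_cons_self ..)
          omega
      rw [ha]
  have hpwP : P.Pairwise (· < ·) := by
    have := hLAeq ▸ hpwLA
    exact this.of_cons
  have hposP : ∀ L ∈ P, 0 < L := by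
    intro L hL
    have := hLAeq ▸ hpwLA
    exact (List.pairwise_cons.mp this).1 L hL
  have hPmem : ∀ x, x ∈ P ↔ (x ∈ S'.map PySem.Str.len ∧ x ≠ 0) := by
    intro x
    constructor
    · intro hx
      refine ⟨(hmemLA x).mp (by rw [hLAeq]; exact List.mem_cons_of_mem _ hx), ?_⟩
      have := hposP x hx
      omega
    · rintro ⟨h1, h2⟩
      have : x ∈ LA := (hmemLA x).mpr h1
      rw [hLAeq] at this
      rcases List.mem_cons.mp this with h | h
      · exact absurd h h2
      · exact h
  -- evaluate A
  have hA : reduce_patterns patterns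
      = (PySem.Set.remove? ((LA.foldl stepA (S', ([] : List String)))).2 "").getD
          ((LA.foldl stepA (S', ([] : List String)))).2 := rfl
  have hfoldA : (LA.foldl stepA (S', ([] : List String))).2 = "" :: stages D P [] := by
    rw [hLAeq, List.foldl_cons]
    rw [stage0_eval patterns P hposP (fun x => hPmem x)]
    exact A_stage_fold D hD P [] _ hpwP hposP (fun q hq => absurd hq (List.not_mem_nil)) rfl
  have hKne : ∀ q ∈ stages D P [], q ≠ "" :=
    stages_ne_empty D P [] (fun q hq => absurd hq (List.not_mem_nil)) hposP
  have hAval : reduce_patterns patterns = stages D P [] := by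
    have hrm : PySem.Set.remove? ("" :: stages D P []) ""
        = some (PySem.Set.discard ("" :: stages D P []) "") := by
      simp [PySem.Set.remove?, PySem.Set.contains]
    rw [hA, hfoldA, hrm, Option.getD_some]
    show List.filter (fun y => !y == "") ("" :: stages D P []) = stages D P []
    rw [List.filter_cons]
    have : (!("" : String) == "") = false := by simp
    rw [this]
    simp only [Bool.false_eq_true, if_false]
    refine List.filter_eq_self.mpr ?_
    intro q hq
    simpa using hKne q hq
  -- evaluate B
  set groups := (PySem.List.dedup patterns).foldl
      (fun (g : PySem.Dict Int (List String)) p => g.modify (PySem.Str.len p) [] (fun l => l ++ [p]))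
      PySem.Dict.empty with hgroupsdef
  have hdedup : PySem.List.dedup patterns = D := PySem.List.dedup_eq_ofList patterns
  have hgroups2 : groups = (D.map (fun p => (PySem.Str.len p, p))).foldl
      (fun d pr => d.modify pr.1 [] (fun l => l ++ [pr.2])) PySem.Dict.empty := by
    rw [hgroupsdef, hdedup, List.foldl_map]
  have hg : ∀ L, groups.getD L [] = D.filter (fun p => PySem.Str.len p == L) := by
    intro L
    rw [hgroups2, PySem.Dict.getD_foldl_modify_append]
    have he : (PySem.Dict.empty : PySem.Dict Int (List String)).getD L [] = [] := rfl
    rw [he, List.nil_append, List.filter_map, List.map_map]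
    have hco : ((fun (x : Int × String) => x.2) ∘ (fun p => (PySem.Str.len p, p))) = id := rfl
    rw [hco, List.map_id]
    rfl
  have hkeys : groups.keys = PySem.Set.ofList (D.map PySem.Str.len) := by
    rw [hgroupsdef, hdedup]
    rw [PySem.Dict.keys_foldl_modify_key D PySem.Str.len [] (fun _ p => (fun l => l ++ [p])) PySem.Dict.empty]
    rfl
  have hB : reduce_patterns_alt patterns
      = PySem.Set.ofList (((PySem.List.sorted groups.keys (fun x => x) false).foldl
          (fun st length => if length == 0 then st else stepB groups st length)
          (([] : List String), ([] : List String)))).1 := rfl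
  set LB := PySem.List.sorted (PySem.Set.ofList (D.map PySem.Str.len)) (fun x => x) false with hLBdef
  have hpwLB : LB.Pairwise (· < ·) := PySem.List.sorted_ofList_pairwise_lt _
  have hmemLB : ∀ x, x ∈ LB ↔ x ∈ D.map PySem.Str.len := by
    intro x
    rw [hLBdef, PySem.List.mem_sorted, PySem.Set.mem_ofList]
  have hPBeq : LB.filter (fun x => !(x == 0)) = P := by
    refine sorted_lt_ext _ _ (hpwLB.filter _) hpwP ?_
    intro x
    rw [List.mem_filter, hmemLB, hPmem]
    constructor
    · rintro ⟨h1, h2⟩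
      have hx0 : x ≠ 0 := by simpa using h2
      refine ⟨?_, hx0⟩
      rcases List.mem_map.mp h1 with ⟨p, hp, rfl⟩
      exact List.mem_map.mpr ⟨p, (PySem.Set.mem_add D "" p).mpr (Or.inl hp), rfl⟩
    · rintro ⟨h1, h2⟩
      refine ⟨?_, by simpa using h2⟩
      rcases List.mem_map.mp h1 with ⟨p, hp, rfl⟩
      rcases (PySem.Set.mem_add D "" p).mp hp with h | h
      · exact List.mem_map.mpr ⟨p, h, rfl⟩
      · subst h
        exact absurd (by simp [PySem.Str.len] : PySem.Str.len "" = 0) h2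
  have hfoldB : (((PySem.List.sorted groups.keys (fun x => x) false).foldl
          (fun st length => if length == 0 then st else stepB groups st length)
          (([] : List String), ([] : List String)))).1 = stages D P [] := by
    rw [hkeys, ← hLBdef, foldl_skip_zero (stepB groups) LB, hPBeq]
    rw [B_stage_fold D hD groups hg P [] hpwP hposP
        (fun q hq => absurd hq (List.not_mem_nil)) List.nodup_nil]
  have hnodup : (stages D P []).Nodup :=
    stages_nodup D hD P [] List.nodup_nil hpwP (fun q hq => absurd hq (List.not_mem_nil))
  rw [hAval, hB, hfoldB, PySem.Set.ofList_eq_self_of_nodup _ hnodup]
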